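-- pv_equiv track=rewrite | github.com/NFJ1618/FwangoScraper | scraper.py | split_into_divisions
-- ===== SOURCE A (Python) =====
-- def split_into_divisions(divisions, player_team_names):
--     divs = []
--     number_in_div = []
--     split = []
--     player_team_names = player_team_names[::-1]
--     for i in divisions:
--         name, num = i.split('\n')
--         if name.lower() == 'free agent':
--             continue
--         num = int(num.strip('()'))
--         divs.append(name)
--         number_in_div.append(num)
--         players = []
--         for i in range(num):
--             players.append(player_team_names.pop())
--         split.append(players)
--     return divs, split
-- ===== SOURCE B (Python) =====
-- def split_into_divisions(divisions, player_team_names):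
--     divs = []
--     split = []
--     idx = 0
--     for d in divisions:
--         name, num = d.split('\n')
--         if name.lower() == 'free agent':
--             continue
--         num = int(num.strip('()'))
--         divs.append(name)
--         split.append(player_team_names[idx:idx + num])
--         idx += num
--     return divs, split
-- ===== Notes on version B (the rewrite author's own statement) =====
-- stated objective: simpler
-- what changed: B drops A's reverse-the-whole-pool-and-pop inner loop and instead keeps a running index into the original player list, taking each division's players as one forward slice.
import Mathlib
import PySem

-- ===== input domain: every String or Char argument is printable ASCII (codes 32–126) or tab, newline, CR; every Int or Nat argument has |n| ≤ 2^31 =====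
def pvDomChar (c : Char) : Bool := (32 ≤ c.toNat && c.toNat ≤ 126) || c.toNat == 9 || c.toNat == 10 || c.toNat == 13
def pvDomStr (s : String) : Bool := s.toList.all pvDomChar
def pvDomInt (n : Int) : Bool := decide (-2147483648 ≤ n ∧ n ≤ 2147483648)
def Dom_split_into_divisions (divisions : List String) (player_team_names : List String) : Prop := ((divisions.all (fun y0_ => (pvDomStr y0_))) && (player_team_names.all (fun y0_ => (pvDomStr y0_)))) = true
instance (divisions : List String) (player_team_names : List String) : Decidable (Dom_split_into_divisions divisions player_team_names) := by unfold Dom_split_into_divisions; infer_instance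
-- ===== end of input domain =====

-- B replaces A's reverse-the-pool-and-pop inner loop with a running index and one slice per
-- division (objective: simpler). Return-value equivalence only: A consumes its local reversed
-- copy, neither mutates the caller's list observably.

-- ===== PORT A =====
-- one iteration of A's outer loop; state = (divs, number_in_div, split, reversed pool)
def pvStepA (st : List String × List Int × List (List String) × List String) (i : String) :
    List String × List Int × List (List String) × List String :=
  let (divs, number_in_div, split, ptn) := st
  match (PySem.Str.split? i "\n").getD [] with      -- name, num = i.split('\n')
  | [name, num] =>
    if PySem.Str.lower name == "free agent" then (divs, number_in_div, split, ptn)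
    else
      match PySem.Int.ofStr? (PySem.Str.stripChars num "()") with   -- int(num.strip('()'))
      | some n =>
        -- players = []; for i in range(num): players.append(player_team_names.pop())
        let inner := (PySem.List.pyRange 0 n).foldl
          (fun (pr : List String × List String) _ =>
            match PySem.List.pop? pr.2 with          -- .pop(); none = IndexError (outside Pre_)
            | some (x, rest) => (pr.1 ++ [x], rest)
            | none => pr)
          ([], ptn)
        (divs ++ [name], number_in_div ++ [n], split ++ [inner.1], inner.2)
      | none => (divs, number_in_div, split, ptn)    -- ValueError (outside Pre_)
  | _ => (divs, number_in_div, split, ptn)           -- unpacking ValueError (outside Pre_)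

def split_into_divisions (divisions : List String) (player_team_names : List String) :
    List String × List (List String) :=
  -- player_team_names = player_team_names[::-1]
  let rev := (PySem.List.slice? player_team_names none none (-1)).getD []
  let st := divisions.foldl pvStepA ([], [], [], rev)
  (st.1, st.2.2.1)

-- ===== PORT B =====
-- one iteration of B's loop; state = (divs, split, idx)
def pvStepB (player_team_names : List String)
    (st : List String × List (List String) × Int) (d : String) :
    List String × List (List String) × Int :=
  let (divs, split, idx) := st
  match (PySem.Str.split? d "\n").getD [] with
  | [name, num] =>
    if PySem.Str.lower name == "free agent" then (divs, split, idx)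
    else
      match PySem.Int.ofStr? (PySem.Str.stripChars num "()") with
      | some n =>
        (divs ++ [name],
         split ++ [PySem.List.slice player_team_names (some idx) (some (idx + n))],
         idx + n)
      | none => (divs, split, idx)
  | _ => (divs, split, idx)

def split_into_divisions_alt (divisions : List String) (player_team_names : List String) :
    List String × List (List String) :=
  let st := divisions.foldl (pvStepB player_team_names) ([], [], (0 : Int))
  (st.1, st.2.1)

-- ===== PRECONDITION & SPEC =====
-- parsed count of one division string: none = A raises on it, some 0 for a skipped
-- 'free agent' row, some k for a kept row requesting k players
def pvCount? (d : String) : Option Int :=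
  match (PySem.Str.split? d "\n").getD [] with
  | [name, num] =>
    if PySem.Str.lower name == "free agent" then some 0
    else PySem.Int.ofStr? (PySem.Str.stripChars num "()")
  | _ => none

-- Pre_ excludes inputs where A raises (a division string without exactly one newline, an
-- unparsable count, or more players requested than the pool holds) and, as a defensible
-- corner, divisions declaring a NEGATIVE count, where A's empty range(num) accidentally
-- appends an empty group while B's negative slice bound reads a different window.
def Pre_split_into_divisions (divisions : List String) (player_team_names : List String) : Prop :=
  (∀ d ∈ divisions, (pvCount? d).isSome = true ∧ 0 ≤ (pvCount? d).getD 0) ∧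
  (divisions.map (fun d => (pvCount? d).getD 0)).sum ≤ (player_team_names.length : Int)
instance (divisions : List String) (player_team_names : List String) :
    Decidable (Pre_split_into_divisions divisions player_team_names) := by
  unfold Pre_split_into_divisions; infer_instance

def pvWitness_split_into_divisions : List String × List String :=
  (["Open\n(2)", "free agent\nx", "Women\n 1 "], ["p", "q", "r"])

def Spec_split_into_divisions (divisions : List String) (player_team_names : List String)
    (out : List String × List (List String)) : Prop :=
  out = split_into_divisions_alt divisions player_team_names
instance (divisions : List String) (player_team_names : List String)
    (out : List String × List (List String)) :
    Decidable (Spec_split_into_divisions divisions player_team_names out) := by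
  unfold Spec_split_into_divisions; infer_instance

-- ===== CLAIM (what is proved, stated in full; the proofs are below) =====
def Claim_equal_split_into_divisions : Prop := ∀ (divisions : List String) (player_team_names : List String), Dom_split_into_divisions divisions player_team_names → Pre_split_into_divisions divisions player_team_names → Spec_split_into_divisions divisions player_team_names (split_into_divisions divisions player_team_names)

-- ===== LEMMAS AND PROOFS =====

-- popping k times from the reversed suffix takes the first k elements in order
lemma pvPopLoop (k : Nat) : ∀ (l : List String) (acc : List String), k ≤ l.length →
    (PySem.List.pyRange 0 (k : Int)).foldl
      (fun (pr : List String × List String) _ =>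
        match PySem.List.pop? pr.2 with
        | some (x, rest) => (pr.1 ++ [x], rest)
        | none => pr)
      (acc, l.reverse)
    = (acc ++ l.take k, (l.drop k).reverse) := by
  induction k with
  | zero =>
    intro l acc _
    rw [show ((0 : Nat) : Int) = 0 from rfl, PySem.List.pyRange_one_eq_nil le_rfl]
    simp
  | succ k ih =>
    intro l acc hk
    have hkl : k < l.length := by omega
    have hsplit : PySem.List.pyRange 0 ((k + 1 : Nat) : Int)
        = PySem.List.pyRange 0 (k : Int) ++ PySem.List.pyRange (k : Int) ((k + 1 : Nat) : Int) := by
      exact PySem.List.pyRange_one_append 0 (k : Int) ((k + 1 : Nat) : Int)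
        (by exact_mod_cast Nat.zero_le k) (by push_cast; omega)
    have hone : PySem.List.pyRange (k : Int) ((k + 1 : Nat) : Int) = [(k : Int)] := by
      rw [show ((k + 1 : Nat) : Int) = (k : Int) + 1 by push_cast; ring]
      exact PySem.List.pyRange_one_singleton (k : Int)
    rw [hsplit, hone, List.foldl_append, ih l acc (by omega)]
    rw [List.foldl_cons, List.foldl_nil]
    show (match PySem.List.pop? ((l.drop k).reverse) with
      | some (x, rest) => ((acc ++ l.take k) ++ [x], rest)
      | none => (acc ++ l.take k, (l.drop k).reverse))
      = (acc ++ l.take (k + 1), (l.drop (k + 1)).reverse)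
    have hdrop2 : (l.drop k).reverse = (l.drop (k + 1)).reverse ++ [l[k]] := by
      rw [List.drop_eq_getElem_cons hkl, List.reverse_cons]
    rw [hdrop2, PySem.List.pop?_last]
    have htake : l.take (k + 1) = l.take k ++ [l[k]] := by
      rw [List.take_add_one]; simp [List.getElem?_eq_getElem hkl]
    rw [htake, ← List.append_assoc]

-- counts of divisions admitted by Pre_ are nonnegative, so their sum is too
lemma pvSum_nonneg (ds : List String)
    (h : ∀ d ∈ ds, (pvCount? d).isSome = true ∧ 0 ≤ (pvCount? d).getD 0) :
    0 ≤ (ds.map (fun d => (pvCount? d).getD 0)).sum := by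
  apply List.sum_nonneg
  intro x hx
  rcases List.mem_map.mp hx with ⟨d, hd, rfl⟩
  exact (h d hd).2

-- A's step on a skipped 'free agent' row leaves the state unchanged
lemma pvStepA_skip (st : List String × List Int × List (List String) × List String)
    (i a b : String) (h1 : (PySem.Str.split? i "\n").getD [] = [a, b])
    (h2 : (PySem.Str.lower a == "free agent") = true) : pvStepA st i = st := by
  obtain ⟨divs, nums, split, rev⟩ := st
  unfold pvStepA
  rw [h1]
  simp [h2]

lemma pvStepB_skip (ptn : List String) (st : List String × List (List String) × Int)
    (i a b : String) (h1 : (PySem.Str.split? i "\n").getD [] = [a, b])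
    (h2 : (PySem.Str.lower a == "free agent") = true) : pvStepB ptn st i = st := by
  obtain ⟨divs, split, idx⟩ := st
  unfold pvStepB
  rw [h1]
  simp [h2]

-- A's step on a kept row pops n players off the reversed pool
lemma pvStepA_keep (divs : List String) (nums : List Int) (split : List (List String))
    (rev : List String) (i a b : String) (n : Int)
    (h1 : (PySem.Str.split? i "\n").getD [] = [a, b])
    (h2 : (PySem.Str.lower a == "free agent") = false)
    (h3 : PySem.Int.ofStr? (PySem.Str.stripChars b "()") = some n) :
    pvStepA (divs, nums, split, rev) i =
      (divs ++ [a], nums ++ [n],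
       split ++ [((PySem.List.pyRange 0 n).foldl
          (fun (pr : List String × List String) _ =>
            match PySem.List.pop? pr.2 with
            | some (x, rest) => (pr.1 ++ [x], rest)
            | none => pr) ([], rev)).1],
       ((PySem.List.pyRange 0 n).foldl
          (fun (pr : List String × List String) _ =>
            match PySem.List.pop? pr.2 with
            | some (x, rest) => (pr.1 ++ [x], rest)
            | none => pr) ([], rev)).2) := by
  unfold pvStepA
  rw [h1]
  simp [h2, h3]

-- B's step on a kept row slices the next n players and advances the index
lemma pvStepB_keep (ptn : List String) (divs : List String) (split : List (List String))
    (idx : Int) (i a b : String) (n : Int)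
    (h1 : (PySem.Str.split? i "\n").getD [] = [a, b])
    (h2 : (PySem.Str.lower a == "free agent") = false)
    (h3 : PySem.Int.ofStr? (PySem.Str.stripChars b "()") = some n) :
    pvStepB ptn (divs, split, idx) i =
      (divs ++ [a], split ++ [PySem.List.slice ptn (some idx) (some (idx + n))], idx + n) := by
  unfold pvStepB
  rw [h1]
  simp [h2, h3]

-- main loop invariant: A's state carries the reversed suffix from j, B's the index j
lemma pvLoop_eq (ptn : List String) (ds : List String) : ∀ (j : Nat)
    (divs : List String) (nums : List Int) (split : List (List String)),
    (∀ d ∈ ds, (pvCount? d).isSome = true ∧ 0 ≤ (pvCount? d).getD 0) →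
    (ds.map (fun d => (pvCount? d).getD 0)).sum + (j : Int) ≤ (ptn.length : Int) →
    (let a := ds.foldl pvStepA (divs, nums, split, (ptn.drop j).reverse)
     let b := ds.foldl (pvStepB ptn) (divs, split, (j : Int))
     a.1 = b.1 ∧ a.2.2.1 = b.2.1) := by
  induction ds with
  | nil => intro j divs nums split _ _; exact ⟨rfl, rfl⟩
  | cons d ds ih =>
    intro j divs nums split hall hsum
    have hd := hall d (by simp)
    have hall' : ∀ x ∈ ds, (pvCount? x).isSome = true ∧ 0 ≤ (pvCount? x).getD 0 :=
      fun x hx => hall x (by simp [hx])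
    have hrest : 0 ≤ (ds.map (fun d => (pvCount? d).getD 0)).sum := pvSum_nonneg ds hall'
    simp only [List.map_cons, List.sum_cons] at hsum
    simp only [List.foldl_cons]
    cases hsp : (PySem.Str.split? d "\n").getD [] with
    | nil => simp [pvCount?, hsp] at hd
    | cons a rest =>
      cases rest with
      | nil => simp [pvCount?, hsp] at hd
      | cons b rest2 =>
        cases rest2 with
        | cons c rest3 => simp [pvCount?, hsp] at hd
        | nil =>
          have hcd : pvCount? d = (if (PySem.Str.lower a == "free agent") = true then some 0
              else PySem.Int.ofStr? (PySem.Str.stripChars b "()")) := by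
            simp only [pvCount?, hsp]
          rw [hcd] at hsum
          simp only [pvCount?, hsp] at hd
          by_cases hfa : (PySem.Str.lower a == "free agent") = true
          · rw [pvStepA_skip _ d a b hsp hfa, pvStepB_skip ptn _ d a b hsp hfa]
            rw [if_pos hfa] at hsum
            simp only [Option.getD_some] at hsum
            exact ih j divs nums split hall' (by omega)
          · have hfa' : (PySem.Str.lower a == "free agent") = false := by
              simpa using hfa
            rw [if_neg hfa] at hd hsum
            cases hn : PySem.Int.ofStr? (PySem.Str.stripChars b "()") with
            | none => rw [hn] at hd; simp at hd
            | some n =>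
              rw [hn] at hd hsum
              simp only [Option.getD_some, Option.isSome_some] at hd hsum
              have hn0 : 0 ≤ n := hd.2
              obtain ⟨kn, rfl⟩ : ∃ kn : Nat, n = (kn : Int) :=
                ⟨n.toNat, (Int.toNat_of_nonneg hn0).symm⟩
              rw [pvStepA_keep divs nums split _ d a b (kn : Int) hsp hfa' hn,
                pvStepB_keep ptn divs split _ d a b (kn : Int) hsp hfa' hn]
              have hklen : kn ≤ (ptn.drop j).length := by
                simp only [List.length_drop]; omega
              rw [pvPopLoop kn (ptn.drop j) [] hklen]
              simp only [List.nil_append, List.drop_drop]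
              rw [PySem.List.slice_natCast_add ptn j kn]
              rw [show ((j : Int) + (kn : Int)) = ((j + kn : Nat) : Int) by push_cast; ring]
              exact ih (j + kn) (divs ++ [a]) (nums ++ [(kn : Int)])
                (split ++ [(ptn.drop j).take kn]) hall' (by push_cast at hsum ⊢; omega)

-- ===== VERDICT (by name: the statement is the Claim_ definition above) =====
theorem split_into_divisions_spec : Claim_equal_split_into_divisions := by
  intro divisions ptn _ hpre
  obtain ⟨hall, hsum⟩ := hpre
  unfold Spec_split_into_divisions split_into_divisions split_into_divisions_alt
  rw [PySem.List.slice?_none_none_neg_one]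
  have h := pvLoop_eq ptn divisions 0 [] [] [] hall (by simpa using hsum)
  simp only [List.drop_zero, Nat.cast_zero] at h
  simp only [Option.getD_some]
  exact Prod.ext h.1 h.2
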